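-- pv_equiv track=rewrite | github.com/SeleznevAS-dev/algorithms_1 | 8z_tasks/task_1.py | white_walkers
-- ===== SOURCE A (Python) =====
-- def white_walkers(village: str) -> bool:
--     digits_indexes = []
--     for i in range(len(village)):
--         if village[i].isdigit():
--             digits_indexes.append(i)
--     if len(digits_indexes) < 2:
--         return False
--     result = False
--     for i in range(len(digits_indexes) - 1):
--         num1 = int(village[digits_indexes[i]])
--         num2 = int(village[digits_indexes[i + 1]])
--         if (num1 + num2 == 10) and (
--             list(village[digits_indexes[i] : digits_indexes[i + 1]]).count("=") == 3
--         ):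
--             result = True
--         elif (num1 + num2 == 10) and (
--             list(village[digits_indexes[i] : digits_indexes[i + 1]]).count("=") != 3
--         ):
--             result = False
--             break
--     return result
-- ===== SOURCE B (Python) =====
-- def white_walkers(village: str) -> bool:
--     prev = None  # last digit char seen
--     eq_count = 0  # number of '=' since that digit
--     found = False
--     for ch in village:
--         if ch.isdigit():
--             if prev is not None and int(prev) + int(ch) == 10:
--                 if eq_count == 3:
--                     found = True
--                 else:
--                     return False
--             prev = ch
--             eq_count = 0
--         elif ch == "=":
--             eq_count += 1
--     return found
-- ===== Notes on version B (the rewrite author's own statement) =====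
-- stated objective: simpler
-- what changed: Replaced A's two passes (collect all digit indexes, then for each adjacent pair re-slice the string and count '=' inside the slice) by one single linear scan that keeps only the previous digit, the number of '=' seen since it, and a found flag.
import Mathlib
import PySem

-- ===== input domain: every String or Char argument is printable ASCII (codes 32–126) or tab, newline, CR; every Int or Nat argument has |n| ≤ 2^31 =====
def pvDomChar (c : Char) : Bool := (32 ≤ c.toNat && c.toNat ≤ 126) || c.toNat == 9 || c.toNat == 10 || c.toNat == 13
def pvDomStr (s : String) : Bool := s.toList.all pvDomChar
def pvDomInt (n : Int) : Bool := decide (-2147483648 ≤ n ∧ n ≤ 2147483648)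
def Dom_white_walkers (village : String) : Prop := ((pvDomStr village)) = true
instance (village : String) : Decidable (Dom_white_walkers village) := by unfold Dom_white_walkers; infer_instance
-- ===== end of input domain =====

-- B replaces A's two-pass index-collecting scan (+ per-pair slice counting) by one single
-- linear pass keeping only the previous digit and the count of '=' since it (objective: simpler; not measured faster).

-- ===== PORT A =====
-- the for-loop with break over `range(len(digits_indexes)-1)`, carried as a recursion over the remaining range list
-- (pyGetD with default is exact here: every index read by the Python loop is in range;
--  (ofChars? [c]).getD 0 is exact because c passed isdigit, so int() cannot raise on the ASCII domain)
def wwLoopA (cs : List Char) (idxs : List Int) : List Int → Bool → Bool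
  | [], result => result
  | i :: rest, result =>
    let num1 : Int := (PySem.Int.ofChars? [PySem.List.pyGetD cs (PySem.List.pyGetD idxs i 0) ' ']).getD 0
    let num2 : Int := (PySem.Int.ofChars? [PySem.List.pyGetD cs (PySem.List.pyGetD idxs (i + 1) 0) ' ']).getD 0
    if num1 + num2 = 10 ∧ (PySem.List.slice cs (some (PySem.List.pyGetD idxs i 0)) (some (PySem.List.pyGetD idxs (i + 1) 0))).count '=' = 3 then
      wwLoopA cs idxs rest true
    else if num1 + num2 = 10 ∧ ¬ (PySem.List.slice cs (some (PySem.List.pyGetD idxs i 0)) (some (PySem.List.pyGetD idxs (i + 1) 0))).count '=' = 3 then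
      false
    else wwLoopA cs idxs rest result

def white_walkers (village : String) : Bool :=
  let cs := village.toList
  let digits_indexes : List Int :=
    (PySem.List.pyRange 0 (cs.length : Int)).foldl
      (fun acc i => if PySem.Chars.strIsdigit [PySem.List.pyGetD cs i ' '] then acc ++ [i] else acc) []
  if digits_indexes.length < 2 then false
  else wwLoopA cs digits_indexes (PySem.List.pyRange 0 ((digits_indexes.length : Int) - 1)) false

-- ===== PORT B =====
-- single pass: prev = last digit char (or none), eqc = number of '=' since it, found = flag
def wwAltGo (prev : Option Char) (eqc : Nat) (found : Bool) : List Char → Bool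
  | [] => found
  | c :: rest =>
    if PySem.Chars.strIsdigit [c] then
      match prev with
      | some p =>
        if (PySem.Int.ofChars? [p]).getD 0 + (PySem.Int.ofChars? [c]).getD 0 = 10 then
          if eqc = 3 then wwAltGo (some c) 0 true rest else false
        else wwAltGo (some c) 0 found rest
      | none => wwAltGo (some c) 0 found rest
    else if c = '=' then wwAltGo prev (eqc + 1) found rest
    else wwAltGo prev eqc found rest

def white_walkers_alt (village : String) : Bool := wwAltGo none 0 false village.toList

-- ===== PRECONDITION & SPEC =====
def Spec_white_walkers (village : String) (out : Bool) : Prop := out = white_walkers_alt village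
instance (village : String) (out : Bool) : Decidable (Spec_white_walkers village out) := by unfold Spec_white_walkers; infer_instance

-- ===== CLAIM (what is proved, stated in full; the proofs are below) =====
def Claim_equal_white_walkers : Prop := ∀ (village : String), Dom_white_walkers village → Spec_white_walkers village (white_walkers village)

-- ===== LEMMAS AND PROOFS =====

/-- int(c) for a digit char, as both ports compute it. -/
def dv (c : Char) : Int := (PySem.Int.ofChars? [c]).getD 0
/-- the one-char isdigit test both ports use -/
def isDig (c : Char) : Bool := PySem.Chars.strIsdigit [c]
/-- positions of the digit chars, A's `digits_indexes` as naturals -/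
def digIdx : List Char → List Nat
  | [] => []
  | c :: cs => if isDig c then 0 :: (digIdx cs).map (· + 1) else (digIdx cs).map (· + 1)
/-- '='-count of the slice cs[a:b] -/
def countEq (cs : List Char) (a b : Nat) : Nat :=
  (PySem.List.slice cs (some (a : Int)) (some (b : Int))).count '='
/-- the (digit, digit, '='-count) data A's pair loop reads, indexed by the digit positions -/
def triples (cs : List Char) : List Nat → List (Char × Char × Nat)
  | a :: b :: t => (cs.getD a ' ', cs.getD b ' ', countEq cs a b) :: triples cs (b :: t)
  | _ => []
/-- the common evaluator of the pair stream (A's loop body = B's digit branch) -/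
def ev : Bool → List (Char × Char × Nat) → Bool
  | f, [] => f
  | f, (a, b, k) :: r => if dv a + dv b = 10 then (if k = 3 then ev true r else false) else ev f r
/-- the pair stream as B produces it: last digit p, k '=' since it -/
def pairs (p : Char) (k : Nat) : List Char → List (Char × Char × Nat)
  | [] => []
  | c :: cs => if isDig c then (p, c, k) :: pairs c 0 cs else pairs p (k + if c = '=' then 1 else 0) cs
def pairs0 : List Char → List (Char × Char × Nat)
  | [] => []
  | c :: cs => if isDig c then pairs c 0 cs else pairs0 cs

theorem triples_short (cs : List Char) (l : List Nat) (h : l.length ≤ 1) :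
    triples cs l = [] := by
  match l with
  | [] => rfl
  | [a] => rfl
  | a :: b :: t => simp at h

theorem digit_ne_eq {c : Char} (h : isDig c = true) : (c = '=') = False := by
  simp only [eq_iff_iff, iff_false]
  intro hc; subst hc
  exact absurd h (by decide)

theorem getD_shift (pre cs : List Char) (a : Nat) (d : Char) :
    (pre ++ cs).getD (a + pre.length) d = cs.getD a d := by
  simp [List.getD, List.getElem?_append_right (by omega : pre.length ≤ a + pre.length)]

theorem countEq_shift (pre cs : List Char) (a b : Nat) :
    countEq (pre ++ cs) (a + pre.length) (b + pre.length) = countEq cs a b := by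
  simp only [countEq, PySem.List.slice_natCast]
  have hd : (pre ++ cs).drop (a + pre.length) = cs.drop a := by
    rw [List.drop_append]
    simp [List.drop_eq_nil_of_le (by omega : pre.length ≤ a + pre.length)]
  have he : b + pre.length - (a + pre.length) = b - a := by omega
  rw [hd, he]

theorem triples_shift (pre cs : List Char) (l : List Nat) :
    triples (pre ++ cs) (l.map (· + pre.length)) = triples cs l := by
  induction l with
  | nil => rfl
  | cons a t ih =>
    match t, ih with
    | [], _ => rfl
    | b :: t, ih =>
      simp only [List.map_cons] at ih ⊢
      rw [triples, triples, getD_shift, getD_shift, countEq_shift, ih]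

theorem pairs_head (cs : List Char) (c : Char) (pre : List Char)
    (hc : isDig c = true) (hpre : ∀ y ∈ pre, isDig y = false) :
    triples (c :: (pre ++ cs)) (0 :: (digIdx cs).map (· + (pre.length + 1)))
      = pairs c (pre.count '=') cs := by
  induction cs generalizing c pre with
  | nil => rfl
  | cons x cs ih =>
    by_cases hx : isDig x = true
    · -- x is the next digit
      rw [digIdx, if_pos hx, pairs, if_pos hx]
      have hmap1 : ((0 :: (digIdx cs).map (· + 1)).map (· + (pre.length + 1)))
          = (pre.length + 1) :: (digIdx cs).map (· + (pre.length + 1 + 1)) := by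
        simp only [List.map_cons, List.map_map, Nat.zero_add]
        refine congrArg (List.cons _) ?_
        apply List.map_congr_left
        intro y _; simp; omega
      rw [hmap1, triples]
      have hsplit : c :: (pre ++ x :: cs) = (c :: pre) ++ (x :: cs) := by simp
      have hhead : (c :: (pre ++ x :: cs)).getD (pre.length + 1) ' ' = x := by
        rw [hsplit]
        have h0 := getD_shift (c :: pre) (x :: cs) 0 ' '
        simp only [List.length_cons, Nat.zero_add] at h0
        simp only [List.cons_append] at h0 ⊢
        exact h0
      have hcnt : countEq (c :: (pre ++ x :: cs)) 0 (pre.length + 1) = pre.count '=' := by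
        simp only [countEq, PySem.List.slice_natCast, Nat.sub_zero, List.drop_zero]
        have ht : (c :: (pre ++ x :: cs)).take (pre.length + 1) = c :: pre := by
          rw [hsplit, List.take_append]
          simp
        rw [ht, List.count_cons]
        simp [digit_ne_eq hc]
      have htail : triples (c :: (pre ++ x :: cs)) ((pre.length + 1) :: (digIdx cs).map (· + (pre.length + 1 + 1)))
          = pairs x 0 cs := by
        have hshift := triples_shift (c :: pre) (x :: cs) (0 :: (digIdx cs).map (· + 1))
        have hmap2 : ((0 :: (digIdx cs).map (· + 1)).map (· + (c :: pre).length))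
            = (pre.length + 1) :: (digIdx cs).map (· + (pre.length + 1 + 1)) := by
          simp only [List.map_cons, List.map_map, Nat.zero_add, List.length_cons]
          refine congrArg (List.cons _) ?_
          apply List.map_congr_left
          intro y _; simp; omega
        rw [hmap2] at hshift
        have hih := ih x ([] : List Char) hx (by simp)
        simp only [List.length_nil, List.nil_append, Nat.zero_add, List.count_nil] at hih
        rw [hsplit, hshift]
        exact hih
      rw [hhead, hcnt, htail]
      have : (c :: (pre ++ x :: cs)).getD 0 ' ' = c := rfl
      rw [this]
    · -- x is not a digit: absorb it into the prefix
      rw [digIdx, if_neg hx, pairs, if_neg hx]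
      have hpre' : ∀ y ∈ pre ++ [x], isDig y = false := by
        intro y hy
        rcases List.mem_append.mp hy with h | h
        · exact hpre y h
        · simp at h; subst h; simpa using hx
      have hih := ih c (pre ++ [x]) hc hpre'
      simp only [List.length_append, List.length_nil, List.length_cons] at hih
      have hmap3 : ((digIdx cs).map (· + 1)).map (· + (pre.length + 1))
          = (digIdx cs).map (· + (pre.length + 0 + 1 + 1)) := by
        simp only [List.map_map]
        apply List.map_congr_left
        intro y _; simp; omega
      have hassoc : c :: (pre ++ x :: cs) = c :: ((pre ++ [x]) ++ cs) := by simp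
      rw [hmap3, hassoc, hih]
      have hcount : (pre ++ [x]).count '=' = pre.count '=' + if x = '=' then 1 else 0 := by
        simp [List.count_append, List.count_singleton]
      rw [hcount]

theorem triples_digIdx (cs : List Char) : triples cs (digIdx cs) = pairs0 cs := by
  induction cs with
  | nil => rfl
  | cons c cs ih =>
    by_cases hc : isDig c = true
    · rw [digIdx, if_pos hc, pairs0, if_pos hc]
      have := pairs_head cs c [] hc (by simp)
      simpa using this
    · rw [digIdx, if_neg hc, pairs0, if_neg hc]
      have := triples_shift [c] cs (digIdx cs)
      simpa using this ▸ ih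

theorem altGo_some (cs : List Char) : ∀ (p : Char) (k : Nat) (f : Bool),
    wwAltGo (some p) k f cs = ev f (pairs p k cs) := by
  induction cs with
  | nil => intro p k f; rfl
  | cons c cs ih =>
    intro p k f
    by_cases hc : isDig c = true
    · rw [pairs, if_pos hc]
      rw [wwAltGo]
      simp only [isDig] at hc
      rw [if_pos hc, ev]
      show (if dv p + dv c = 10 then if k = 3 then wwAltGo (some c) 0 true cs else false
            else wwAltGo (some c) 0 f cs) = _
      by_cases h10 : dv p + dv c = 10
      · by_cases h3 : k = 3 <;> simp [h10, h3, ih]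
      · simp [h10, ih]
    · rw [pairs, if_neg hc, wwAltGo]
      simp only [isDig] at hc
      rw [if_neg hc]
      by_cases he : c = '=' <;> simp [he, ih]

theorem altGo_none (cs : List Char) : ∀ (k : Nat) (f : Bool),
    wwAltGo none k f cs = ev f (pairs0 cs) := by
  induction cs with
  | nil => intro k f; rfl
  | cons c cs ih =>
    intro k f
    by_cases hc : isDig c = true
    · rw [pairs0, if_pos hc, wwAltGo]
      simp only [isDig] at hc
      rw [if_pos hc]
      exact altGo_some cs c 0 f
    · rw [pairs0, if_neg hc, wwAltGo]
      simp only [isDig] at hc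
      rw [if_neg hc]
      by_cases he : c = '=' <;> simp [he, ih]

theorem range_filter_digIdx (cs : List Char) :
    (List.range cs.length).filter (fun i => isDig (cs.getD i ' ')) = digIdx cs := by
  induction cs with
  | nil => rfl
  | cons c cs ih =>
    rw [List.length_cons, List.range_succ_eq_map, digIdx, List.filter_cons]
    have hcomp : ((fun i => isDig ((c :: cs).getD i ' ')) ∘ Nat.succ)
        = (fun i => isDig (cs.getD i ' ')) := by funext i; rfl
    rw [List.filter_map, hcomp, ih]
    by_cases hc : isDig c = true <;>
      simp [hc, List.getD]

theorem fold_digits (cs : List Char) :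
    (PySem.List.pyRange 0 (cs.length : Int)).foldl
      (fun acc i => if PySem.Chars.strIsdigit [PySem.List.pyGetD cs i ' '] then acc ++ [i] else acc) []
    = (digIdx cs).map (Nat.cast : Nat → Int) := by
  have h := PySem.List.foldl_append_if
    (fun i => PySem.Chars.strIsdigit [PySem.List.pyGetD cs i ' ']) (fun x => x)
    (PySem.List.pyRange 0 (cs.length : Int)) []
  rw [h, List.nil_append, List.map_id']
  rw [PySem.List.pyRange_zero_natCast, List.filter_map]
  have hcomp : ((fun i => PySem.Chars.strIsdigit [PySem.List.pyGetD cs i ' ']) ∘ (fun k : Nat => (k : Int)))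
      = (fun i => isDig (cs.getD i ' ')) := by
    funext i
    simp [PySem.List.pyGetD_natCast, isDig]
  rw [hcomp, range_filter_digIdx]

theorem loopA_ev (cs : List Char) (l : List Nat) :
    ∀ (n j : Nat) (r : Bool), j + n + 1 = l.length →
    wwLoopA cs (l.map (Nat.cast : Nat → Int)) (PySem.List.pyRange (j : Int) ((l.length : Int) - 1)) r
      = ev r (triples cs (l.drop j)) := by
  intro n
  induction n with
  | zero =>
    intro j r hj
    have h1 : ((l.length : Int) - 1) = (j : Int) := by omega
    rw [h1]
    have h2 : PySem.List.pyRange (j : Int) (j : Int) = [] := by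
      simp [PySem.List.pyRange]
    rw [h2, wwLoopA]
    have h3 : (l.drop j).length ≤ 1 := by simp; omega
    rw [triples_short cs _ h3, ev]
  | succ n ih =>
    intro j r hj
    have hlt : (j : Int) < (l.length : Int) - 1 := by omega
    rw [PySem.List.pyRange_one_cons hlt, wwLoopA]
    have hj1 : j < l.length := by omega
    have hj2 : j + 1 < l.length := by omega
    have hgd : ∀ (m : Nat) (hm : m < l.length),
        PySem.List.pyGetD (l.map (Nat.cast : Nat → Int)) (m : Int) 0 = ((l[m]'hm : Nat) : Int) := by
      intro m hm
      rw [PySem.List.pyGetD_natCast,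
        List.getD_eq_getElem _ _ (by simpa using hm), List.getElem_map]
    have hcast : ((j : Int) + 1) = ((j + 1 : Nat) : Int) := by push_cast; ring
    rw [hcast, hgd j hj1, hgd (j + 1) hj2]
    have hdrop : l.drop j = l[j] :: l[j + 1] :: l.drop (j + 2) := by
      rw [List.drop_eq_getElem_cons hj1, List.drop_eq_getElem_cons hj2]
    have hdrop1 : l.drop (j + 1) = l[j + 1] :: l.drop (j + 2) := List.drop_eq_getElem_cons hj2
    rw [hdrop, triples]
    have hnum : ∀ (a : Nat),
        (PySem.Int.ofChars? [PySem.List.pyGetD cs ((a : Nat) : Int) ' ']).getD 0 = dv (cs.getD a ' ') := by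
      intro a; rw [PySem.List.pyGetD_natCast]; rfl
    rw [hnum, hnum]
    show (if dv (cs.getD l[j] ' ') + dv (cs.getD l[j+1] ' ') = 10 ∧ countEq cs l[j] l[j+1] = 3 then
            wwLoopA cs (l.map (Nat.cast : Nat → Int)) (PySem.List.pyRange (((j + 1 : Nat) : Int)) ((l.length : Int) - 1)) true
          else if dv (cs.getD l[j] ' ') + dv (cs.getD l[j+1] ' ') = 10 ∧ ¬ countEq cs l[j] l[j+1] = 3 then
            false
          else wwLoopA cs (l.map (Nat.cast : Nat → Int)) (PySem.List.pyRange (((j + 1 : Nat) : Int)) ((l.length : Int) - 1)) r)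
        = ev r ((cs.getD l[j] ' ', cs.getD l[j+1] ' ', countEq cs l[j] l[j+1]) :: triples cs (l[j+1] :: l.drop (j+2)))
    rw [ev]
    have hrec : ∀ b : Bool,
        wwLoopA cs (l.map (Nat.cast : Nat → Int)) (PySem.List.pyRange (((j + 1 : Nat) : Int)) ((l.length : Int) - 1)) b
          = ev b (triples cs (l[j+1] :: l.drop (j+2))) := by
      intro b
      have h := ih (j + 1) b (by omega)
      rw [hdrop1] at h
      exact h
    by_cases h10 : dv (cs.getD l[j] ' ') + dv (cs.getD l[j+1] ' ') = 10
    · by_cases h3 : countEq cs l[j] l[j+1] = 3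
      · rw [if_pos ⟨h10, h3⟩, if_pos h10, if_pos h3]
        exact hrec true
      · rw [if_neg (by tauto), if_pos ⟨h10, h3⟩, if_pos h10, if_neg h3]
    · rw [if_neg (by tauto), if_neg (by tauto), if_neg h10]
      exact hrec r

theorem whiteA_ev (village : String) :
    white_walkers village = ev false (triples village.toList (digIdx village.toList)) := by
  rw [white_walkers]
  simp only [fold_digits]
  set cs := village.toList
  set l := digIdx cs with hl
  rw [List.length_map]
  by_cases hlen : l.length < 2
  · rw [if_pos hlen, triples_short cs l (by omega), ev]
  · rw [if_neg hlen]
    obtain ⟨k, hk⟩ : ∃ k, l.length = k + 2 := ⟨l.length - 2, by omega⟩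
    have h := loopA_ev cs l (k + 1) 0 false (by omega)
    simpa using h

-- ===== VERDICT (by name: the statement is the Claim_ definition above) =====
theorem white_walkers_spec : Claim_equal_white_walkers := by
  intro village _
  show white_walkers village = white_walkers_alt village
  rw [whiteA_ev, triples_digIdx, white_walkers_alt, altGo_none]
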